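-- pv_equiv track=rewrite | github.com/kherrera6219/DataLogicEngine | knowledge_algorithms/ka_36_containment_condition.py | _convert_indicator_to_pattern
-- ===== SOURCE A (Python) =====
-- def _convert_indicator_to_pattern(indicator: str) -> str:
--     """
--     Convert a trigger indicator to a regex pattern.
--
--     Args:
--         indicator: The indicator string
--
--     Returns:
--         Regular expression pattern to match indicator
--     """
--     # Handle special cases
--     if ">" in indicator:
--         # Convert threshold indicators to more general patterns
--         parts = indicator.split(">")
--         if len(parts) == 2:
--             metric = parts[0].strip()
--             # Convert to pattern that matches mentions of high/excessive values
--             return f"{metric}.*(?:high|excessive|extreme|too much|over limit)"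
--
--     # Replace common operators and terms with more general patterns
--     replacements = [
--         ("_", "\\s+"),  # Allow spaces instead of underscores
--         ("detected", "(?:detected|found|identified|observed)"),
--         ("exceeding", "(?:exceeding|above|beyond|over)"),
--         ("approaching", "(?:approaching|near|close to|nearing)")
--     ]
--
--     pattern = indicator
--     for old, new in replacements:
--         pattern = pattern.replace(old, new)
--
--     return pattern
-- ===== SOURCE B (Python) =====
-- import re
--
-- _REPLACEMENTS = {
--     "_": "\\s+",
--     "detected": "(?:detected|found|identified|observed)",
--     "exceeding": "(?:exceeding|above|beyond|over)",
--     "approaching": "(?:approaching|near|close to|nearing)",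
-- }
--
-- # one alternation of the (escaped) literal keys; a single left-to-right scan
-- # replaces all four sequential whole-string replace passes (no inserted
-- # replacement text contains a later key, so the results coincide)
-- _KEY_RE = re.compile("|".join(re.escape(k) for k in _REPLACEMENTS))
--
--
-- def _convert_indicator_to_pattern(indicator: str) -> str:
--     if ">" in indicator:
--         parts = indicator.split(">")
--         if len(parts) == 2:
--             metric = parts[0].strip()
--             return f"{metric}.*(?:high|excessive|extreme|too much|over limit)"
--     return _KEY_RE.sub(lambda m: _REPLACEMENTS[m.group(0)], indicator)
-- ===== Notes on version B (the rewrite author's own statement) =====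
-- stated objective: idiomatic
-- what changed: The four sequential whole-string replace passes are fused into a single left-to-right scan: one compiled alternation regex of the literal keys with re.sub replacing each match from a key-to-replacement mapping (proved exact because no key overlaps another key or any inserted replacement text).
import Mathlib
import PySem

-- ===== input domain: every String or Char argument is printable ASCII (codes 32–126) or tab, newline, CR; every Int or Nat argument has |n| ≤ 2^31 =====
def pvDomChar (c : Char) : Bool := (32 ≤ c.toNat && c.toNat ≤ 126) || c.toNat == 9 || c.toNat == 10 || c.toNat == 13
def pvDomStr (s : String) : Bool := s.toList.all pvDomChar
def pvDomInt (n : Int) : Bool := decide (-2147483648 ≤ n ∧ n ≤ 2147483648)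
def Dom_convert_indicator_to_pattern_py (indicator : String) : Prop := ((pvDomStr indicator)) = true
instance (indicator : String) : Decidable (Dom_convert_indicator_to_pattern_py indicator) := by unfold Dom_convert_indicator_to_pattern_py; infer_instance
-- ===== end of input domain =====

-- B replaces A's four sequential whole-string replace passes by ONE left-to-right
-- scan over the ordered rule table (re.sub over an alternation of the literal keys).

-- ===== PORT A =====

-- the `replacements` list of A
def pvReplsA : List (String × String) :=
  [("_", "\\s+"),
   ("detected", "(?:detected|found|identified|observed)"),
   ("exceeding", "(?:exceeding|above|beyond|over)"),
   ("approaching", "(?:approaching|near|close to|nearing)")]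

def convert_indicator_to_pattern_py (indicator : String) : String :=
  if PySem.Str.isIn ">" indicator = true then
    let parts := PySem.Chars.splitOn indicator.toList ['>']
    if parts.length = 2 then
      -- f"{metric}.*(?:high|excessive|extreme|too much|over limit)";
      -- parts[0] is headD (split always returns a nonempty list)
      String.ofList (PySem.Chars.strip (parts.headD []) ++
        ".*(?:high|excessive|extreme|too much|over limit)".toList)
    else
      -- for old, new in replacements: pattern = pattern.replace(old, new)
      pvReplsA.foldl (fun pat r => PySem.Str.replace pat r.1 r.2) indicator
  else
    pvReplsA.foldl (fun pat r => PySem.Str.replace pat r.1 r.2) indicator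

-- ===== PORT B =====

-- Source B's _REPLACEMENTS table, in alternation order (keys are nonempty literals)
def pvRules : List (List Char × List Char) :=
  [("_".toList, "\\s+".toList),
   ("detected".toList, "(?:detected|found|identified|observed)".toList),
   ("exceeding".toList, "(?:exceeding|above|beyond|over)".toList),
   ("approaching".toList, "(?:approaching|near|close to|nearing)".toList)]

-- hand port of `_KEY_RE.sub(lambda m: _REPLACEMENTS[m.group(0)], s)`: a single
-- left-to-right scan; at each position the first (in alternation order) literal
-- key that matches is replaced and the scan resumes after it — exact for an
-- alternation of nonempty literal keys.  On a match of key k at `c :: t` the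
-- scan consumes k.length characters, i.e. continues at `t.drop (k.length - 1)`.
def pvSub (rules : List (List Char × List Char)) : List Char → List Char
  | [] => []
  | c :: t =>
    match rules.find? (fun r => r.1.isPrefixOf (c :: t)) with
    | some (k, v) => v ++ pvSub rules (t.drop (k.length - 1))
    | none => c :: pvSub rules t
termination_by l => l.length
decreasing_by all_goals (simp only [List.length_drop, List.length_cons]; omega)

def convert_indicator_to_pattern_py_alt (indicator : String) : String :=
  if PySem.Str.isIn ">" indicator = true then
    let parts := PySem.Chars.splitOn indicator.toList ['>']
    if parts.length = 2 then
      String.ofList (PySem.Chars.strip (parts.headD []) ++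
        ".*(?:high|excessive|extreme|too much|over limit)".toList)
    else
      String.ofList (pvSub pvRules indicator.toList)
  else
    String.ofList (pvSub pvRules indicator.toList)

-- ===== PRECONDITION & SPEC =====
def Spec_convert_indicator_to_pattern_py (indicator : String) (out : String) : Prop := out = convert_indicator_to_pattern_py_alt indicator
instance (indicator : String) (out : String) : Decidable (Spec_convert_indicator_to_pattern_py indicator out) := by unfold Spec_convert_indicator_to_pattern_py; infer_instance

-- ===== CLAIM (what is proved, stated in full; the proofs are below) =====
def Claim_equal_convert_indicator_to_pattern_py : Prop := ∀ (indicator : String), Dom_convert_indicator_to_pattern_py indicator → Spec_convert_indicator_to_pattern_py indicator (convert_indicator_to_pattern_py indicator)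

-- ===== LEMMAS AND PROOFS =====

theorem pvSub_nil (rules : List (List Char × List Char)) : pvSub rules [] = [] := by
  rw [pvSub.eq_def]

theorem pvSub_cons_none (rules : List (List Char × List Char)) (c : Char) (t : List Char)
    (h : rules.find? (fun r => r.1.isPrefixOf (c :: t)) = none) :
    pvSub rules (c :: t) = c :: pvSub rules t := by
  rw [pvSub.eq_def]; simp only []; rw [h]

theorem pvSub_cons_some (rules : List (List Char × List Char)) (c : Char) (t k v : List Char)
    (h : rules.find? (fun r => r.1.isPrefixOf (c :: t)) = some (k, v)) :
    pvSub rules (c :: t) = v ++ pvSub rules (t.drop (k.length - 1)) := by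
  rw [pvSub.eq_def]; simp only []; rw [h]

-- a key matching a prefix of u ++ X forces the key and u to be prefix-comparable
theorem pv_prefix_cases {k u X : List Char} (h : k.isPrefixOf (u ++ X) = true) :
    u <+: k ∨ k <+: u := by
  rw [List.isPrefixOf_iff_prefix] at h
  exact List.prefix_or_prefix_of_prefix (List.prefix_append u X) h

theorem pv_not_prefix_append {k u : List Char} (h1 : ¬ u <+: k) (h2 : ¬ k <+: u)
    (X : List Char) : ¬ k.isPrefixOf (u ++ X) = true := by
  intro h; rcases pv_prefix_cases h with h | h
  · exact h1 h
  · exact h2 h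

-- the scanner copies a block w in which no rule key can start a match
theorem pv_passOver (rules : List (List Char × List Char)) (w X : List Char)
    (h : ∀ r ∈ rules, ∀ i < w.length, ¬ r.1.isPrefixOf (w.drop i ++ X) = true) :
    pvSub rules (w ++ X) = w ++ pvSub rules X := by
  induction w with
  | nil => simp
  | cons a w' ih =>
    have hnone : (List.find? (fun r => r.1.isPrefixOf (a :: (w' ++ X))) rules) = none := by
      rw [List.find?_eq_none]
      intro r hr
      simpa using h r hr 0 (by simp)
    rw [List.cons_append, pvSub_cons_none _ _ _ hnone,
        ih (fun r hr i hi => by simpa using h r hr (i + 1) (by simpa using Nat.succ_lt_succ hi))]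
    rfl

-- prefix transfer: if (a suffix of) the key k is a prefix of the scanner's
-- output, it was already a prefix of the scanner's input (hC4: suffixes of k
-- are prefix-incomparable with every replacement text of `rules`)
theorem pv_prefix_transfer (rules : List (List Char × List Char)) (k : List Char)
    (hC4 : ∀ r ∈ rules, ∀ j < k.length, ¬ (k.drop j) <+: r.2 ∧ ¬ r.2 <+: (k.drop j)) :
    ∀ s j, (k.drop j).isPrefixOf (pvSub rules s) = true → (k.drop j).isPrefixOf s = true := by
  intro s
  induction s with
  | nil => intro j h; simpa [pvSub_nil] using h
  | cons c t ih =>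
    intro j h
    rcases hkj : k.drop j with _ | ⟨d, ds⟩
    · simp [List.isPrefixOf]
    · have hjlt : j < k.length := by
        by_contra hge
        rw [List.drop_eq_nil_of_le (by omega)] at hkj; simp at hkj
      rcases hf : rules.find? (fun r => r.1.isPrefixOf (c :: t)) with _ | ⟨k', v'⟩
      · rw [pvSub_cons_none _ _ _ hf] at h
        rw [hkj] at h
        simp only [List.isPrefixOf, Bool.and_eq_true] at h ⊢
        refine ⟨h.1, ?_⟩
        have hds : k.drop (j + 1) = ds := by
          rw [← List.drop_drop]
          rw [hkj]; rfl
        have := ih (j + 1) (by rw [hds]; exact h.2)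
        rw [hds] at this; exact this
      · exfalso
        rw [pvSub_cons_some _ _ _ _ _ hf] at h
        rw [hkj] at h
        have hmem := List.mem_of_find?_eq_some hf
        have := hC4 (k', v') hmem j hjlt
        rw [hkj] at this
        rcases pv_prefix_cases h with hp | hp
        · exact this.2 hp
        · exact this.1 hp

-- fusing one more rule (k, v), of lowest priority, into the scanner equals
-- running the scanner and then a second scan with the single rule (k, v)
theorem pv_fusion (rules : List (List Char × List Char)) (k v : List Char)
    (hk : k ≠ [])
    (hC1 : ∀ r ∈ rules, ∀ i < r.2.length, ¬ (r.2.drop i) <+: k ∧ ¬ k <+: (r.2.drop i))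
    (hC2 : ∀ r ∈ rules, ∀ i < k.length, 0 < i → ¬ (k.drop i) <+: r.1 ∧ ¬ r.1 <+: (k.drop i))
    (hC4 : ∀ r ∈ rules, ∀ j < k.length, ¬ (k.drop j) <+: r.2 ∧ ¬ r.2 <+: (k.drop j)) :
    ∀ s, pvSub [(k, v)] (pvSub rules s) = pvSub (rules ++ [(k, v)]) s := by
  have main : ∀ n (s : List Char), s.length ≤ n →
      pvSub [(k, v)] (pvSub rules s) = pvSub (rules ++ [(k, v)]) s := by
    intro n
    induction n with
    | zero =>
      intro s hs
      have : s = [] := List.length_eq_zero_iff.mp (Nat.le_zero.mp hs)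
      subst this; simp [pvSub_nil]
    | succ n ih =>
      intro s hs
      rcases s with _ | ⟨c, t⟩
      · simp [pvSub_nil]
      rcases hf : rules.find? (fun r => r.1.isPrefixOf (c :: t)) with _ | ⟨k', v'⟩
      · -- no rule of `rules` fires at s
        rcases hp : k.isPrefixOf (c :: t) with _ | _
        · -- nothing fires: one character is copied
          have hnone2 : (List.find? (fun r => r.1.isPrefixOf (c :: pvSub rules t)) [(k, v)]) = none := by
            rw [List.find?_eq_none]
            intro r hr
            simp only [List.mem_singleton] at hr
            subst hr
            simp only [Bool.not_eq_true]
            rcases hkp : k.isPrefixOf (c :: pvSub rules t) with _ | _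
            · rfl
            · exfalso
              have : k.isPrefixOf (pvSub rules (c :: t)) = true := by
                rw [pvSub_cons_none _ _ _ hf]; exact hkp
              have := pv_prefix_transfer rules k hC4 (c :: t) 0 (by simpa using this)
              simp only [List.drop_zero] at this
              rw [hp] at this; exact Bool.noConfusion this
          have hcombnone : (List.find? (fun r => r.1.isPrefixOf (c :: t)) (rules ++ [(k, v)])) = none := by
            rw [List.find?_append, hf]
            simp only [Option.or]
            rw [List.find?_eq_none]
            intro r hr
            simp only [List.mem_singleton] at hr
            subst hr
            simp [hp]
          rw [pvSub_cons_none _ _ _ hf, pvSub_cons_none _ _ _ hnone2,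
              pvSub_cons_none _ _ _ hcombnone,
              ih t (by simpa using Nat.lt_succ_iff.mp (Nat.lt_of_lt_of_le (Nat.lt_succ_self _) hs))]
        · -- k fires
          obtain ⟨r, hr⟩ := List.isPrefixOf_iff_prefix.mp hp
          have hpass : pvSub rules (k ++ r) = k ++ pvSub rules r := by
            apply pv_passOver
            intro rl hrl i hi
            rcases Nat.eq_zero_or_pos i with h0 | h0
            · subst h0
              simp only [List.drop_zero]
              rw [hr]
              have := List.find?_eq_none.mp hf rl hrl
              simpa using this
            · have := hC2 rl hrl i hi h0
              exact pv_not_prefix_append this.1 this.2 r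
          obtain ⟨a, k'', hkc⟩ := List.exists_cons_of_ne_nil hk
          have hsingle : ∀ X : List Char, (List.find? (fun rr => rr.1.isPrefixOf (a :: (k'' ++ X))) [(k, v)]) = some (k, v) := by
            intro X
            apply List.find?_cons_of_pos
            simp only [hkc]
            rw [List.isPrefixOf_iff_prefix, ← List.cons_append]
            exact List.prefix_append _ _
          have hstep : pvSub [(k, v)] (k ++ pvSub rules r) = v ++ pvSub [(k, v)] (pvSub rules r) := by
            rw [hkc, List.cons_append, pvSub_cons_some _ _ _ _ _ (by rw [← hkc]; exact hsingle (pvSub rules r))]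
            congr 1
            rw [hkc]
            simp only [List.length_cons, Nat.add_sub_cancel]
            rw [List.drop_left]
          have hrlen : r.length ≤ n := by
            have hlen : k.length + r.length = t.length + 1 := by
              have := congrArg List.length hr; simpa using this
            have hkpos : 0 < k.length := List.length_pos_of_ne_nil hk
            simp only [List.length_cons] at hs
            omega
          have hRHS : pvSub (rules ++ [(k, v)]) (c :: t) = v ++ pvSub (rules ++ [(k, v)]) r := by
            have hfcomb : (List.find? (fun rr => rr.1.isPrefixOf (c :: t)) (rules ++ [(k, v)])) = some (k, v) := by
              rw [List.find?_append, hf]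
              simp only [Option.or]
              apply List.find?_cons_of_pos
              simpa using hp
            rw [pvSub_cons_some _ _ _ _ _ hfcomb]
            congr 1
            have : t.drop (k.length - 1) = (c :: t).drop k.length := by
              rw [hkc]; simp
            rw [this, ← hr, List.drop_left]
          calc pvSub [(k, v)] (pvSub rules (c :: t))
              = pvSub [(k, v)] (k ++ pvSub rules r) := by rw [← hr, hpass]
            _ = v ++ pvSub [(k, v)] (pvSub rules r) := hstep
            _ = v ++ pvSub (rules ++ [(k, v)]) r := by rw [ih r hrlen]
            _ = pvSub (rules ++ [(k, v)]) (c :: t) := hRHS.symm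
      · -- a rule of `rules` fires at s
        have hmem := List.mem_of_find?_eq_some hf
        have hLHS : pvSub rules (c :: t) = v' ++ pvSub rules (t.drop (k'.length - 1)) :=
          pvSub_cons_some _ _ _ _ _ hf
        have hpassv : pvSub [(k, v)] (v' ++ pvSub rules (t.drop (k'.length - 1)))
            = v' ++ pvSub [(k, v)] (pvSub rules (t.drop (k'.length - 1))) := by
          apply pv_passOver
          intro rl hrl i hi
          simp only [List.mem_singleton] at hrl
          subst hrl
          have := hC1 (k', v') hmem i hi
          exact pv_not_prefix_append this.1 this.2 _
        have hfcomb : (List.find? (fun rr => rr.1.isPrefixOf (c :: t)) (rules ++ [(k, v)])) = some (k', v') := by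
          rw [List.find?_append, hf]; rfl
        have htlen : (t.drop (k'.length - 1)).length ≤ n := by
          simp only [List.length_drop]
          simp only [List.length_cons] at hs
          omega
        rw [hLHS, hpassv, ih _ htlen, pvSub_cons_some _ _ _ _ _ hfcomb]
  intro s; exact main s.length s le_rfl

-- Python str.replace (nonempty key) IS the single-rule scanner
theorem pv_go_eq (old new : List Char) (hold : old ≠ []) :
    ∀ fuel (l acc : List Char), l.length ≤ fuel →
      PySem.Chars.replace.go old new fuel l acc = acc.reverse ++ pvSub [(old, new)] l := by
  intro fuel
  induction fuel with
  | zero =>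
    intro l acc h
    have : l = [] := List.length_eq_zero_iff.mp (Nat.le_zero.mp h)
    subst this
    rw [PySem.Chars.replace.go, pvSub_nil]
  | succ n ih =>
    intro l acc h
    rcases l with _ | ⟨c, t⟩
    · rw [PySem.Chars.replace.go, pvSub_nil]
      · simp
      · omega
    rw [PySem.Chars.replace.go]
    rcases hp : old.isPrefixOf (c :: t) with _ | _
    · simp only [Bool.false_eq_true, if_false]
      rw [ih t (c :: acc) (by simpa using Nat.lt_succ_iff.mp (Nat.lt_of_lt_of_le (Nat.lt_succ_self _) h))]
      rw [pvSub_cons_none _ _ _ (by simp [hp])]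
      simp
    · simp only [if_true]
      obtain ⟨a, o'', hko⟩ := List.exists_cons_of_ne_nil hold
      have hl : (List.drop old.length (c :: t)).length ≤ n := by
        simp only [List.length_drop, List.length_cons]
        have : 0 < old.length := List.length_pos_of_ne_nil hold
        simp only [List.length_cons] at h
        omega
      rw [ih _ (new.reverse ++ acc) hl]
      rw [pvSub_cons_some _ _ _ _ _ (List.find?_cons_of_pos (l := []) (by simpa using hp))]
      have hdrop : List.drop old.length (c :: t) = t.drop (old.length - 1) := by
        rw [hko]; simp
      rw [hdrop]
      simp

theorem pv_replace_eq_pvSub (old new : List Char) (hold : old ≠ []) (s : List Char) :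
    PySem.Chars.replace s old new = pvSub [(old, new)] s := by
  rw [PySem.Chars.replace]
  simp only [List.isEmpty_iff, hold, if_false]
  simpa using pv_go_eq old new hold s.length s [] le_rfl

-- A's four replace passes equal B's one-pass scan: fuse the rules one by one
-- (the decidable side conditions say that keys never overlap each other or any
-- inserted replacement text)
theorem pv_main (cs : List Char) :
    PySem.Chars.replace (PySem.Chars.replace (PySem.Chars.replace (PySem.Chars.replace cs
      "_".toList "\\s+".toList)
      "detected".toList "(?:detected|found|identified|observed)".toList)
      "exceeding".toList "(?:exceeding|above|beyond|over)".toList)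
      "approaching".toList "(?:approaching|near|close to|nearing)".toList
    = pvSub pvRules cs := by
  rw [pv_replace_eq_pvSub _ _ (by decide), pv_replace_eq_pvSub _ _ (by decide),
      pv_replace_eq_pvSub _ _ (by decide), pv_replace_eq_pvSub _ _ (by decide)]
  rw [pv_fusion _ _ _ (by decide) (by decide) (by decide) (by decide) cs]
  rw [pv_fusion _ _ _ (by decide) (by decide) (by decide) (by decide) cs]
  rw [pv_fusion _ _ _ (by decide) (by decide) (by decide) (by decide) cs]
  rfl

theorem pv_fallback (indicator : String) :
    pvReplsA.foldl (fun pat r => PySem.Str.replace pat r.1 r.2) indicator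
      = String.ofList (pvSub pvRules indicator.toList) := by
  simp only [pvReplsA, List.foldl_cons, List.foldl_nil, PySem.Str.replace, String.toList_ofList]
  rw [pv_main]

-- ===== VERDICT (by name: the statement is the Claim_ definition above) =====
theorem convert_indicator_to_pattern_py_spec : Claim_equal_convert_indicator_to_pattern_py := by
  intro indicator _
  unfold Spec_convert_indicator_to_pattern_py
  rw [convert_indicator_to_pattern_py, convert_indicator_to_pattern_py_alt]
  by_cases h1 : PySem.Str.isIn ">" indicator = true
  · simp only [h1, if_true]
    by_cases h2 : (PySem.Chars.splitOn indicator.toList ['>']).length = 2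
    · simp only [h2, if_true]
    · simp only [h2, if_false]
      exact pv_fallback indicator
  · simp only [h1]
    exact pv_fallback indicator
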